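-- pv_equiv track=rewrite | github.com/60jong/ProblemSolving | 프로그래머스/코딩테스트연습/레벨 3/파괴되지않은건물.py | solution
-- ===== SOURCE A (Python) =====
-- def solution(board, skill):
--     answer = 0
--     N, M = len(board), len(board[0])
--     total_memo = [[0] * (M + 1) for _ in range(N + 1)]
--
--     memo = [[0] * (M + 1) for _ in range(N + 1)]
--
--     for t, r1, c1, r2, c2, degree in skill:
--         m = 1 if t == 2 else -1
--         memo[r1][c1] += m * degree
--         memo[r1][c2 + 1] -= m * degree
--         memo[r2 + 1][c1] -= m * degree
--         memo[r2 + 1][c2 + 1] += m * degree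
--
--     for m in range(M + 1):
--         holder = 0
--         for n in range(N + 1):
--             holder += memo[n][m]
--             total_memo[n][m] += holder
--
--     holder = 0
--     for n in range(N):
--         for m in range(M + 1):
--             holder += total_memo[n][m]
--             if m != M:
--                 board[n][m] += holder
--                 if board[n][m] > 0:
--                     answer += 1
--     return answer
-- ===== SOURCE B (Python) =====
-- def solution(board, skill):
--     # Naive rectangle fill: apply each skill directly to the N x M grid, then count positives.
--     N, M = len(board), len(board[0])
--     for t, r1, c1, r2, c2, degree in skill:
--         d = degree if t == 2 else -degree
--         for i in range(r1, r2 + 1):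
--             for j in range(c1, c2 + 1):
--                 board[i][j] += d
--     answer = 0
--     for i in range(N):
--         for j in range(M):
--             if board[i][j] > 0:
--                 answer += 1
--     return answer
-- ===== Notes on version B (the rewrite author's own statement) =====
-- stated objective: simpler
-- what changed: Replaces the 2-D difference-array with corner marks and two prefix-sum passes by a direct per-skill rectangle fill on the board followed by a plain positive-cell count over the N x M grid.
-- outside the precondition, e.g. on solution([[1, 1], [1, 1]], [[1, -1, 0, 0, 0, 1]]): A returns 4, B returns 2; on solution([[1], [-1], [-2], [2]], [[1, 2, 0, 0, 0, 5]]): A returns 3, B returns 2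
import Mathlib
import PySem

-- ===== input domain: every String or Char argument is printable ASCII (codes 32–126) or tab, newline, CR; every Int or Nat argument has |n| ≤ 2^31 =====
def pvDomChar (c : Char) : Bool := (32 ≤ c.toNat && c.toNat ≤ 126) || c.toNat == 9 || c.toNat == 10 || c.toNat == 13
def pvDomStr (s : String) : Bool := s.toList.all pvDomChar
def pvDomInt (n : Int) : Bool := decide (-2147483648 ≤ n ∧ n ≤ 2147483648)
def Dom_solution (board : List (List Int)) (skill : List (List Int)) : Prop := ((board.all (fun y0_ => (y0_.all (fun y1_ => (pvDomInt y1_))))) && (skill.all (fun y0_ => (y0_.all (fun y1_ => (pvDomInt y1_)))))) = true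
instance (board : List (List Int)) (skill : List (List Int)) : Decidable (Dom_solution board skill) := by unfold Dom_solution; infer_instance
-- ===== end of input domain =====

-- B replaces A's difference-array + two prefix-sum passes by a direct rectangle fill and a
-- positive-cell count (simpler, not faster). Both Pythons mutate `board` in place the same way;
-- the equivalence proved here is about the RETURN value.

-- ===== PORT A =====
-- shared grid helpers: read cell (i,j) with default 0, update cell (i,j)
def pvGet2 (g : List (List Int)) (i j : Nat) : Int := (g.getD i []).getD j 0
def pvUpd2 (g : List (List Int)) (i j : Nat) (f : Int → Int) : List (List Int) :=
  g.modify i (fun r => r.modify j f)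
def pvZeros (n m : Nat) : List (List Int) :=
  List.replicate n (List.replicate m 0)

-- one skill's four corner marks on `memo` (Python: memo[r1][c1] += …, etc.);
-- `.toNat` is exact here because Pre_solution keeps all indices nonnegative and in range
def pvSkillDiff (memo : List (List Int)) (s : List Int) : List (List Int) :=
  match s with
  | [t, r1, c1, r2, c2, degree] =>
      let d : Int := (if t == 2 then 1 else -1) * degree
      pvUpd2 (pvUpd2 (pvUpd2 (pvUpd2 memo r1.toNat c1.toNat (· + d))
        r1.toNat (c2 + 1).toNat (· - d)) (r2 + 1).toNat c1.toNat (· - d))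
        (r2 + 1).toNat (c2 + 1).toNat (· + d)
  | _ => memo   -- Python raises on wrong arity; excluded by Pre_solution

-- `for n in range(N+1): holder += memo[n][m]; total_memo[n][m] += holder` for one column m
def pvColInner (memo : List (List Int)) (N m : Nat) (total : List (List Int)) : List (List Int) :=
  ((List.range (N + 1)).foldl
    (fun (st : List (List Int) × Int) n =>
      let holder := st.2 + pvGet2 memo n m
      (pvUpd2 st.1 n m (· + holder), holder)) (total, 0)).1

-- `for m in range(M+1): …` column prefix pass building total_memo from zeros
def pvColPass (memo : List (List Int)) (N M : Nat) : List (List Int) :=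
  (List.range (M + 1)).foldl (fun total m => pvColInner memo N m total) (pvZeros (N + 1) (M + 1))

-- inner loop `for m in range(M+1)` of the final pass; state = (board, holder, answer)
def pvFinInner (total : List (List Int)) (M n : Nat)
    (st : List (List Int) × Int × Int) : List (List Int) × Int × Int :=
  (List.range (M + 1)).foldl
    (fun st m =>
      let holder := st.2.1 + pvGet2 total n m
      if m ≠ M then
        let b' := pvUpd2 st.1 n m (· + holder)
        if pvGet2 b' n m > 0 then (b', holder, st.2.2 + 1) else (b', holder, st.2.2)
      else (st.1, holder, st.2.2)) st

def solution (board : List (List Int)) (skill : List (List Int)) : Int :=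
  let N := board.length
  let M := (board.headD []).length   -- Python len(board[0]); board ≠ [] by Pre_solution
  let memo := skill.foldl pvSkillDiff (pvZeros (N + 1) (M + 1))
  let total := pvColPass memo N M
  ((List.range N).foldl (fun st n => pvFinInner total M n st) (board, 0, 0)).2.2

-- ===== PORT B =====
-- add d to every cell of the inclusive rectangle of one skill (Source B's nested ranges);
-- `.toNat` exact under Pre_solution (coordinates nonnegative)
def pvFill (g : List (List Int)) (s : List Int) : List (List Int) :=
  match s with
  | [t, r1, c1, r2, c2, degree] =>
      let d : Int := if t == 2 then degree else -degree
      (List.range' r1.toNat (r2 + 1 - r1).toNat).foldl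
        (fun g i =>
          (List.range' c1.toNat (c2 + 1 - c1).toNat).foldl
            (fun g j => pvUpd2 g i j (· + d)) g) g
  | _ => g   -- Python raises on wrong arity; excluded by Pre_solution

def solution_alt (board : List (List Int)) (skill : List (List Int)) : Int :=
  let N := board.length
  let M := (board.headD []).length   -- Python len(board[0]); board ≠ [] by Pre_solution
  let g := skill.foldl pvFill board
  (List.range N).foldl (fun a i =>
    (List.range M).foldl (fun a j => if pvGet2 g i j > 0 then a + 1 else a) a) 0

-- ===== PRECONDITION & SPEC =====
def pvOkSkill (N M : Nat) (s : List Int) : Bool :=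
  match s with
  | [_, r1, c1, r2, c2, _] =>
      decide (0 ≤ r1) && decide (r1 ≤ r2) && decide (r2 < (N : Int)) &&
      decide (0 ≤ c1) && decide (c1 ≤ c2) && decide (c2 < (M : Int))
  | _ => false

-- Pre_ excludes: the empty board (A raises IndexError); ragged boards and skills with negative
-- or out-of-range coordinates or wrong arity — outside the problem's rectangular-grid/valid-skill
-- domain, where A either raises or returns an accidental value via Python negative-index wraparound.
def Pre_solution (board : List (List Int)) (skill : List (List Int)) : Prop :=
  board ≠ [] ∧ (∀ row ∈ board, (board.headD []).length ≤ row.length) ∧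
    ∀ s ∈ skill, pvOkSkill board.length (board.headD []).length s = true

instance (board : List (List Int)) (skill : List (List Int)) : Decidable (Pre_solution board skill) := by
  unfold Pre_solution; infer_instance

def pvWitness_solution : List (List Int) × List (List Int) :=
  ([[1, 0], [0, 2]], [[1, 0, 0, 1, 1, 1], [2, 0, 0, 0, 1, 3]])

def Spec_solution (board : List (List Int)) (skill : List (List Int)) (out : Int) : Prop := out = solution_alt board skill
instance (board : List (List Int)) (skill : List (List Int)) (out : Int) : Decidable (Spec_solution board skill out) := by unfold Spec_solution; infer_instance

-- ===== CLAIM (what is proved, stated in full; the proofs are below) =====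
def Claim_equal_solution : Prop := ∀ (board : List (List Int)) (skill : List (List Int)), Dom_solution board skill → Pre_solution board skill → Spec_solution board skill (solution board skill)


-- ===== LEMMAS AND PROOFS =====

-- value each skill contributes to cell (i,j) of the board
def pvCover (s : List Int) (i j : Nat) : Int :=
  match s with
  | [t, r1, c1, r2, c2, deg] =>
      if r1 ≤ (i : Int) ∧ (i : Int) ≤ r2 ∧ c1 ≤ (j : Int) ∧ (j : Int) ≤ c2 then
        (if t == 2 then deg else -deg) else 0
  | _ => 0

-- grid shape invariant
def pvRect (g : List (List Int)) (N M : Nat) : Prop :=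
  g.length = N ∧ ∀ a, a < N → M ≤ (g.getD a []).length

theorem pvRect_zeros (n m : Nat) : pvRect (pvZeros n m) n m := by
  constructor
  · simp [pvZeros]
  · intro a ha
    simp [pvZeros, List.getD, List.getElem?_replicate, ha]

theorem pvGet2_zeros (n m a b : Nat) : pvGet2 (pvZeros n m) a b = 0 := by
  unfold pvGet2 pvZeros
  simp only [List.getD_eq_getElem?_getD, List.getElem?_replicate]
  rcases lt_or_ge a n with h | h
  · simp only [if_pos h, Option.getD_some, List.getElem?_replicate]
    split <;> simp
  · simp [Nat.not_lt.mpr h]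

theorem getD_upd2 (g : List (List Int)) (i j a : Nat) (f : Int → Int) :
    (pvUpd2 g i j f).getD a [] = if i = a then (g.getD a []).modify j f else g.getD a [] := by
  unfold pvUpd2
  simp only [List.getD_eq_getElem?_getD, List.getElem?_modify]
  cases h : g[a]? with
  | none => simp [h]
  | some r => simp [h]

theorem pvRect_upd2 (g : List (List Int)) (N M i j : Nat) (f : Int → Int)
    (h : pvRect g N M) : pvRect (pvUpd2 g i j f) N M := by
  obtain ⟨h1, h2⟩ := h
  refine ⟨by simpa [pvUpd2, List.length_modify] using h1, fun a ha => ?_⟩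
  rw [getD_upd2]
  split
  · rw [List.length_modify]; exact h2 a ha
  · exact h2 a ha

theorem pvGet2_upd2_ne (g : List (List Int)) (i j a b : Nat) (f : Int → Int)
    (h : ¬(a = i ∧ b = j)) : pvGet2 (pvUpd2 g i j f) a b = pvGet2 g a b := by
  unfold pvGet2
  rw [getD_upd2]
  by_cases hia : i = a
  · subst hia
    have hbj : b ≠ j := fun hb => h ⟨rfl, hb⟩
    simp only [if_pos rfl]
    simp only [List.getD_eq_getElem?_getD, List.getElem?_modify]
    cases hr : (g.getD i [])[b]? <;> simp [hr, Ne.symm hbj]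
  · simp [hia]

theorem pvGet2_upd2_eq (g : List (List Int)) (i j : Nat) (f : Int → Int)
    (h1 : i < g.length) (h2 : j < (g.getD i []).length) :
    pvGet2 (pvUpd2 g i j f) i j = f (pvGet2 g i j) := by
  unfold pvGet2
  rw [getD_upd2, if_pos rfl]
  simp only [List.getD_eq_getElem?_getD] at h2 ⊢
  simp only [List.getElem?_modify]
  cases hr : (g[i]?.getD [])[j]? with
  | none => exact absurd (List.getElem?_eq_none_iff.mp hr) (by omega)
  | some v => simp [hr]

theorem pvGet2_upd2 (g : List (List Int)) (i j a b : Nat) (f : Int → Int)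
    (hi : i < g.length) (hj : j < (g.getD i []).length) :
    pvGet2 (pvUpd2 g i j f) a b = if a = i ∧ b = j then f (pvGet2 g a b) else pvGet2 g a b := by
  split
  · rename_i h; obtain ⟨ha, hb⟩ := h; subst ha; subst hb; exact pvGet2_upd2_eq g a b f hi hj
  · rename_i h; exact pvGet2_upd2_ne g i j a b f h

theorem pvSkill_shape (N M : Nat) (s : List Int) (hs : pvOkSkill N M s = true) :
    ∃ t r1 c1 r2 c2 deg, s = [t, r1, c1, r2, c2, deg] ∧
      0 ≤ r1 ∧ r1 ≤ r2 ∧ r2 < (N : Int) ∧ 0 ≤ c1 ∧ c1 ≤ c2 ∧ c2 < (M : Int) := by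
  rcases s with _ | ⟨t, _ | ⟨r1, _ | ⟨c1, _ | ⟨r2, _ | ⟨c2, _ | ⟨deg, _ | ⟨x, rest⟩⟩⟩⟩⟩⟩⟩ <;>
    simp [pvOkSkill] at hs
  exact ⟨t, r1, c1, r2, c2, deg, rfl, by tauto⟩

-- the four corner marks one skill writes into `memo`
def pvDiffval (s : List Int) (n m : Nat) : Int :=
  match s with
  | [t, r1, c1, r2, c2, deg] =>
      let d : Int := (if t == 2 then 1 else -1) * deg
      (if (n : Int) = r1 ∧ (m : Int) = c1 then d else 0)
      - (if (n : Int) = r1 ∧ (m : Int) = c2 + 1 then d else 0)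
      - (if (n : Int) = r2 + 1 ∧ (m : Int) = c1 then d else 0)
      + (if (n : Int) = r2 + 1 ∧ (m : Int) = c2 + 1 then d else 0)
  | _ => 0

theorem pvSkillDiff_rect (memo : List (List Int)) (N M : Nat) (s : List Int)
    (hR : pvRect memo (N + 1) (M + 1)) (hs : pvOkSkill N M s = true) :
    pvRect (pvSkillDiff memo s) (N + 1) (M + 1) := by
  obtain ⟨t, r1, c1, r2, c2, deg, rfl, -⟩ := pvSkill_shape N M s hs
  simp only [pvSkillDiff]
  exact pvRect_upd2 _ _ _ _ _ _ (pvRect_upd2 _ _ _ _ _ _ (pvRect_upd2 _ _ _ _ _ _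
    (pvRect_upd2 _ _ _ _ _ _ hR)))

theorem pvSkillDiff_get2 (memo : List (List Int)) (N M : Nat) (s : List Int) (n m : Nat)
    (hR : pvRect memo (N + 1) (M + 1)) (hs : pvOkSkill N M s = true) :
    pvGet2 (pvSkillDiff memo s) n m = pvGet2 memo n m + pvDiffval s n m := by
  obtain ⟨t, r1, c1, r2, c2, deg, rfl, hr1, hr12, hr2, hc1, hc12, hc2⟩ := pvSkill_shape N M s hs
  have R1 := pvRect_upd2 memo (N+1) (M+1) r1.toNat c1.toNat (· + (if t == 2 then 1 else -1) * deg) hR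
  have R2 := pvRect_upd2 _ (N+1) (M+1) r1.toNat (c2+1).toNat (· - (if t == 2 then 1 else -1) * deg) R1
  have R3 := pvRect_upd2 _ (N+1) (M+1) (r2+1).toNat c1.toNat (· - (if t == 2 then 1 else -1) * deg) R2
  simp only [pvSkillDiff, pvDiffval]
  have lr1 : r1.toNat < N + 1 := by omega
  have lr2 : (r2 + 1).toNat < N + 1 := by omega
  have lc1 : c1.toNat < M + 1 := by omega
  have lc2 : (c2 + 1).toNat < M + 1 := by omega
  rw [pvGet2_upd2 _ _ _ _ _ _ (by rw [R3.1]; omega) (by have := R3.2 _ lr2; omega)]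
  rw [pvGet2_upd2 _ _ _ _ _ _ (by rw [R2.1]; omega) (by have := R2.2 _ lr2; omega)]
  rw [pvGet2_upd2 _ _ _ _ _ _ (by rw [R1.1]; omega) (by have := R1.2 _ lr1; omega)]
  rw [pvGet2_upd2 _ _ _ _ _ _ (by rw [hR.1]; omega) (by have := hR.2 _ lr1; omega)]
  simp only [show ((n : Int) = r1 ∧ (m : Int) = c1) ↔ (n = r1.toNat ∧ m = c1.toNat) from by omega,
      show ((n : Int) = r1 ∧ (m : Int) = c2 + 1) ↔ (n = r1.toNat ∧ m = (c2 + 1).toNat) from by omega,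
      show ((n : Int) = r2 + 1 ∧ (m : Int) = c1) ↔ (n = (r2 + 1).toNat ∧ m = c1.toNat) from by omega,
      show ((n : Int) = r2 + 1 ∧ (m : Int) = c2 + 1) ↔ (n = (r2 + 1).toNat ∧ m = (c2 + 1).toNat) from by omega]
  split_ifs <;> omega

theorem pvMemoFold_get2 (skill : List (List Int)) (memo : List (List Int)) (N M n m : Nat)
    (hok : ∀ s ∈ skill, pvOkSkill N M s = true) (hR : pvRect memo (N + 1) (M + 1)) :
    pvGet2 (skill.foldl pvSkillDiff memo) n m
      = pvGet2 memo n m + (skill.map (fun s => pvDiffval s n m)).sum := by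
  induction skill generalizing memo with
  | nil => simp
  | cons s rest ih =>
      simp only [List.foldl_cons, List.map_cons, List.sum_cons]
      rw [ih _ (fun x hx => hok x (List.mem_cons_of_mem s hx))
        (pvSkillDiff_rect memo N M s hR (hok s (List.mem_cons_self))),
        pvSkillDiff_get2 memo N M s n m hR (hok s (List.mem_cons_self))]
      ring

theorem pvColInner_aux (memo : List (List Int)) (N M m k : Nat) (total : List (List Int))
    (hm : m < M + 1) (hk : k ≤ N + 1) (hR : pvRect total (N + 1) (M + 1)) :
    pvRect ((List.range k).foldl
      (fun (st : List (List Int) × Int) n =>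
        let holder := st.2 + pvGet2 memo n m
        (pvUpd2 st.1 n m (· + holder), holder)) (total, 0)).1 (N + 1) (M + 1) ∧
    ((List.range k).foldl
      (fun (st : List (List Int) × Int) n =>
        let holder := st.2 + pvGet2 memo n m
        (pvUpd2 st.1 n m (· + holder), holder)) (total, 0)).2
      = ∑ n ∈ Finset.range k, pvGet2 memo n m ∧
    ∀ a b, pvGet2 ((List.range k).foldl
      (fun (st : List (List Int) × Int) n =>
        let holder := st.2 + pvGet2 memo n m
        (pvUpd2 st.1 n m (· + holder), holder)) (total, 0)).1 a b
      = if b = m ∧ a < k then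
          pvGet2 total a b + ∑ n ∈ Finset.range (a + 1), pvGet2 memo n m
        else pvGet2 total a b := by
  induction k with
  | zero => refine ⟨hR, by simp, fun a b => by simp⟩
  | succ k ih =>
      obtain ⟨ihR, ihH, ihG⟩ := ih (by omega)
      rw [List.range_succ, List.foldl_append]
      constructor
      · exact pvRect_upd2 _ _ _ _ _ _ ihR
      constructor
      · simp only [List.foldl_cons, List.foldl_nil]
        rw [ihH, Finset.sum_range_succ]
      · intro a b
        simp only [List.foldl_cons, List.foldl_nil]
        rw [pvGet2_upd2 _ _ _ _ _ _ (by rw [ihR.1]; omega) (Nat.lt_of_lt_of_le (by omega) (ihR.2 k (by omega)))]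
        rw [ihH, ihG a b]
        by_cases hak : a = k ∧ b = m
        · obtain ⟨rfl, rfl⟩ := hak
          rw [if_pos (show a = a ∧ b = b from ⟨rfl, rfl⟩),
            if_neg (show ¬(b = b ∧ a < a) by omega),
            if_pos (show b = b ∧ a < a + 1 from ⟨rfl, by omega⟩), Finset.sum_range_succ]
        · rw [if_neg hak]
          by_cases hbm : b = m ∧ a < k
          · rw [if_pos hbm, if_pos (show b = m ∧ a < k + 1 from ⟨hbm.1, by omega⟩)]
          · rw [if_neg hbm,
              if_neg (show ¬(b = m ∧ a < k + 1) from fun h => hbm ⟨h.1, by omega⟩)]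

theorem pvColInner_get2 (memo : List (List Int)) (N M m : Nat) (total : List (List Int))
    (hm : m < M + 1) (hR : pvRect total (N + 1) (M + 1)) :
    pvRect (pvColInner memo N m total) (N + 1) (M + 1) ∧
    ∀ a b, pvGet2 (pvColInner memo N m total) a b
      = if b = m ∧ a < N + 1 then
          pvGet2 total a b + ∑ n ∈ Finset.range (a + 1), pvGet2 memo n m
        else pvGet2 total a b := by
  obtain ⟨hR', -, hG⟩ := pvColInner_aux memo N M m (N + 1) total hm le_rfl hR
  exact ⟨hR', hG⟩

theorem pvColPass_aux (memo : List (List Int)) (N M k : Nat) (hk : k ≤ M + 1) :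
    pvRect ((List.range k).foldl (fun total m => pvColInner memo N m total)
      (pvZeros (N + 1) (M + 1))) (N + 1) (M + 1) ∧
    ∀ a b, pvGet2 ((List.range k).foldl (fun total m => pvColInner memo N m total)
      (pvZeros (N + 1) (M + 1))) a b
      = if b < k ∧ a < N + 1 then ∑ n ∈ Finset.range (a + 1), pvGet2 memo n b else 0 := by
  induction k with
  | zero => exact ⟨pvRect_zeros _ _, fun a b => by simp [pvGet2_zeros]⟩
  | succ k ih =>
      obtain ⟨ihR, ihG⟩ := ih (by omega)
      rw [List.range_succ, List.foldl_append]
      simp only [List.foldl_cons, List.foldl_nil]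
      obtain ⟨R', G'⟩ := pvColInner_get2 memo N M k _ (by omega) ihR
      refine ⟨R', fun a b => ?_⟩
      rw [G' a b, ihG a b]
      by_cases hb : b = k
      · subst hb
        by_cases ha : a < N + 1
        · rw [if_pos ⟨rfl, ha⟩, if_neg (by omega), if_pos ⟨by omega, ha⟩]; ring
        · rw [if_neg (by omega), if_neg (by omega), if_neg (by omega)]
      · by_cases h2 : b < k ∧ a < N + 1
        · rw [if_neg (by tauto), if_pos h2, if_pos ⟨by omega, h2.2⟩]
        · rw [if_neg (by tauto), if_neg h2, if_neg (by omega)]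

-- 1 if the cell survives, else 0
def pvInd (x : Int) : Int := if x > 0 then 1 else 0

-- the loop body of A's final pass, named for the proofs
def pvFinStep (total : List (List Int)) (M n : Nat)
    (st : List (List Int) × Int × Int) (m : Nat) : List (List Int) × Int × Int :=
  if m ≠ M then
    if pvGet2 (pvUpd2 st.1 n m (· + (st.2.1 + pvGet2 total n m))) n m > 0 then
      (pvUpd2 st.1 n m (· + (st.2.1 + pvGet2 total n m)), st.2.1 + pvGet2 total n m, st.2.2 + 1)
    else (pvUpd2 st.1 n m (· + (st.2.1 + pvGet2 total n m)), st.2.1 + pvGet2 total n m, st.2.2)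
  else (st.1, st.2.1 + pvGet2 total n m, st.2.2)

theorem pvFinInner_eq (total : List (List Int)) (M n : Nat) (st : List (List Int) × Int × Int) :
    pvFinInner total M n st = (List.range (M + 1)).foldl (pvFinStep total M n) st := rfl

theorem pvFinInner_aux (total bd : List (List Int)) (N M n k : Nat) (H0 A0 : Int)
    (hn : n < N) (hk : k ≤ M + 1) (hR : pvRect bd N M) :
    pvRect ((List.range k).foldl (pvFinStep total M n) (bd, H0, A0)).1 N M ∧
    ((List.range k).foldl (pvFinStep total M n) (bd, H0, A0)).2.1
      = H0 + ∑ m ∈ Finset.range k, pvGet2 total n m ∧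
    ((List.range k).foldl (pvFinStep total M n) (bd, H0, A0)).2.2
      = A0 + ∑ m ∈ Finset.range (min k M),
          pvInd (pvGet2 bd n m + (H0 + ∑ m' ∈ Finset.range (m + 1), pvGet2 total n m')) ∧
    ∀ a b, pvGet2 ((List.range k).foldl (pvFinStep total M n) (bd, H0, A0)).1 a b
      = if a = n ∧ b < min k M then
          pvGet2 bd a b + (H0 + ∑ m' ∈ Finset.range (b + 1), pvGet2 total n m')
        else pvGet2 bd a b := by
  induction k with
  | zero => exact ⟨hR, by simp, by simp, fun a b => by simp⟩
  | succ k ih =>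
      obtain ⟨ihR, ihH, ihA, ihG⟩ := ih (by omega)
      rw [List.range_succ, List.foldl_append]
      simp only [List.foldl_cons, List.foldl_nil]
      set F := (List.range k).foldl (pvFinStep total M n) (bd, H0, A0) with hF
      by_cases hkM : k = M
      · subst hkM
        unfold pvFinStep
        rw [if_neg (by simp)]
        refine ⟨ihR, ?_, ?_, ?_⟩
        · simp only [ihH, Finset.sum_range_succ]; ring
        · simpa using ihA
        · intro a b
          rw [ihG a b]
          simp
      · have hkM' : k < M := by omega
        unfold pvFinStep
        rw [if_pos (by omega)]
        have hwrite : pvGet2 (pvUpd2 F.1 n k (· + (F.2.1 + pvGet2 total n k))) n k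
            = pvGet2 bd n k + (H0 + ∑ m' ∈ Finset.range (k + 1), pvGet2 total n m') := by
          rw [pvGet2_upd2_eq _ _ _ _ (by rw [ihR.1]; omega) (by have := ihR.2 _ hn; omega)]
          rw [ihG n k, if_neg (by omega), ihH, Finset.sum_range_succ]
          ring
        have hg : ∀ a b, pvGet2 (pvUpd2 F.1 n k (· + (F.2.1 + pvGet2 total n k))) a b
            = if a = n ∧ b = k then
                pvGet2 bd a b + (H0 + ∑ m' ∈ Finset.range (b + 1), pvGet2 total n m')
              else pvGet2 F.1 a b := by
          intro a b
          rw [pvGet2_upd2 _ _ _ _ _ _ (by rw [ihR.1]; omega) (by have := ihR.2 _ hn; omega)]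
          split
          · rename_i h
            obtain ⟨rfl, rfl⟩ := h
            rw [ihG a b, if_neg (by omega), ihH, Finset.sum_range_succ]
            ring
          · rfl
        refine ⟨?_, ?_, ?_, ?_⟩
        · split <;> exact pvRect_upd2 _ _ _ _ _ _ ihR
        · split <;> (simp only [ihH, Finset.sum_range_succ]; ring)
        · rw [show min (k + 1) M = k + 1 by omega] at ⊢
          rw [show min k M = k by omega] at ihA
          rw [Finset.sum_range_succ]
          split
          · rename_i hpos
            rw [hwrite] at hpos
            dsimp only
            rw [ihA]
            simp only [pvInd]
            rw [if_pos hpos]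
            ring
          · rename_i hpos
            rw [hwrite] at hpos
            dsimp only
            rw [ihA]
            simp only [pvInd]
            rw [if_neg hpos]
            ring
        · intro a b
          rw [show min (k + 1) M = k + 1 by omega] at ⊢
          rw [show min k M = k by omega] at ihG
          have key : pvGet2 (pvUpd2 F.1 n k (· + (F.2.1 + pvGet2 total n k))) a b
              = if a = n ∧ b < k + 1 then
                  pvGet2 bd a b + (H0 + ∑ m' ∈ Finset.range (b + 1), pvGet2 total n m')
                else pvGet2 bd a b := by
            rw [hg a b, ihG a b]
            by_cases h1 : a = n ∧ b = k
            · rw [if_pos h1, if_pos ⟨h1.1, by omega⟩]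
            · rw [if_neg h1]
              by_cases h2 : a = n ∧ b < k
              · rw [if_pos h2, if_pos ⟨h2.1, by omega⟩]
              · rw [if_neg h2, if_neg (fun h => by
                  rcases Nat.lt_succ_iff_lt_or_eq.mp h.2 with h' | h'
                  · exact h2 ⟨h.1, h'⟩
                  · exact h1 ⟨h.1, h'⟩)]
          split <;> exact key

theorem pvFinOuter_aux (total bd : List (List Int)) (N M k : Nat) (hk : k ≤ N)
    (hR : pvRect bd N M) :
    pvRect ((List.range k).foldl (fun st n => pvFinInner total M n st) (bd, 0, 0)).1 N M ∧
    ((List.range k).foldl (fun st n => pvFinInner total M n st) (bd, 0, 0)).2.1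
      = ∑ n ∈ Finset.range k, ∑ m ∈ Finset.range (M + 1), pvGet2 total n m ∧
    ((List.range k).foldl (fun st n => pvFinInner total M n st) (bd, 0, 0)).2.2
      = ∑ n ∈ Finset.range k, ∑ m ∈ Finset.range M,
          pvInd (pvGet2 bd n m
            + ((∑ n' ∈ Finset.range n, ∑ m' ∈ Finset.range (M + 1), pvGet2 total n' m')
              + ∑ m' ∈ Finset.range (m + 1), pvGet2 total n m')) ∧
    ∀ a b, k ≤ a → pvGet2 ((List.range k).foldl
      (fun st n => pvFinInner total M n st) (bd, 0, 0)).1 a b = pvGet2 bd a b := by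
  induction k with
  | zero => exact ⟨hR, by simp, by simp, fun a b _ => rfl⟩
  | succ k ih =>
      obtain ⟨ihR, ihH, ihA, ihG⟩ := ih (by omega)
      rw [List.range_succ, List.foldl_append]
      simp only [List.foldl_cons, List.foldl_nil]
      set F := (List.range k).foldl (fun st n => pvFinInner total M n st) (bd, 0, 0) with hF
      rw [show pvFinInner total M k F = pvFinInner total M k (F.1, F.2.1, F.2.2) from rfl,
        pvFinInner_eq]
      obtain ⟨R', H', A', G'⟩ :=
        pvFinInner_aux total F.1 N M k (M + 1) F.2.1 F.2.2 (by omega) le_rfl ihR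
      refine ⟨R', ?_, ?_, ?_⟩
      · conv_rhs => rw [Finset.sum_range_succ]
        rw [H', ihH]
      · conv_rhs => rw [Finset.sum_range_succ]
        rw [A', ihA, show min (M + 1) M = M by omega, ihH]
        congr 1
        refine Finset.sum_congr rfl (fun m hm => ?_)
        rw [ihG k m le_rfl]
      · intro a b ha
        rw [G' a b, if_neg (fun h => by omega), ihG a b (by omega)]

theorem pvRowFill_aux (g : List (List Int)) (N M i : Nat) (d : Int) (len : Nat) :
    ∀ (c : Nat) (g : List (List Int)), i < N → c + len ≤ M → pvRect g N M →
    pvRect ((List.range' c len).foldl (fun g j => pvUpd2 g i j (· + d)) g) N M ∧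
    ∀ a b, pvGet2 ((List.range' c len).foldl (fun g j => pvUpd2 g i j (· + d)) g) a b
      = pvGet2 g a b + if a = i ∧ c ≤ b ∧ b < c + len then d else 0 := by
  induction len with
  | zero =>
      intro c g hi hcl hR
      exact ⟨hR, fun a b => by rw [if_neg (by omega)]; simp⟩
  | succ len ih =>
      intro c g hi hcl hR
      rw [List.range'_succ]
      simp only [List.foldl_cons]
      have hR' : pvRect (pvUpd2 g i c (· + d)) N M := pvRect_upd2 _ _ _ _ _ _ hR
      obtain ⟨R', G'⟩ := ih (c + 1) (pvUpd2 g i c (· + d)) hi (by omega) hR'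
      refine ⟨R', fun a b => ?_⟩
      rw [G' a b,
        pvGet2_upd2 _ _ _ _ _ _ (by rw [hR.1]; omega) (by have := hR.2 _ hi; omega)]
      by_cases h1 : a = i ∧ b = c
      · rw [if_pos h1, if_neg (by omega), if_pos (by omega)]; try ring
      · rw [if_neg h1]
        by_cases h2 : a = i ∧ c + 1 ≤ b ∧ b < c + 1 + len
        · rw [if_pos h2, if_pos (by omega)]; try ring
        · rw [if_neg h2, if_neg (by
            intro h
            rcases Nat.eq_or_lt_of_le h.2.1 with h' | h'
            · exact h1 ⟨h.1, h'.symm⟩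
            · exact h2 ⟨h.1, by omega, by omega⟩)]

theorem pvRectFill_aux (N M i0 : Nat) (d : Int) (clen rlen : Nat) :
    ∀ (r c : Nat) (g : List (List Int)), r + rlen ≤ N → c + clen ≤ M → pvRect g N M →
    pvRect ((List.range' r rlen).foldl
      (fun g i => (List.range' c clen).foldl (fun g j => pvUpd2 g i j (· + d)) g) g) N M ∧
    ∀ a b, pvGet2 ((List.range' r rlen).foldl
      (fun g i => (List.range' c clen).foldl (fun g j => pvUpd2 g i j (· + d)) g) g) a b
      = pvGet2 g a b
        + if r ≤ a ∧ a < r + rlen ∧ c ≤ b ∧ b < c + clen then d else 0 := by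
  induction rlen with
  | zero =>
      intro r c g hr hc hR
      exact ⟨hR, fun a b => by rw [if_neg (by omega)]; simp⟩
  | succ rlen ih =>
      intro r c g hr hc hR
      rw [List.range'_succ]
      simp only [List.foldl_cons]
      obtain ⟨R0, G0⟩ := pvRowFill_aux g N M r d clen c g (by omega) hc hR
      obtain ⟨R', G'⟩ := ih (r + 1) c _ (by omega) hc R0
      refine ⟨R', fun a b => ?_⟩
      rw [G' a b, G0 a b]
      by_cases h1 : a = r ∧ c ≤ b ∧ b < c + clen
      · rw [if_pos h1, if_neg (by omega), if_pos (by omega)]; try ring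
      · rw [if_neg h1]
        by_cases h2 : r + 1 ≤ a ∧ a < r + 1 + rlen ∧ c ≤ b ∧ b < c + clen
        · rw [if_pos h2, if_pos (by omega)]; try ring
        · rw [if_neg h2, if_neg (by
            intro h
            rcases Nat.eq_or_lt_of_le h.1 with h' | h'
            · exact h1 ⟨h'.symm, h.2.2⟩
            · exact h2 ⟨by omega, by omega, h.2.2⟩)]
          simp

theorem pvFill_get2 (bd : List (List Int)) (N M : Nat) (s : List Int)
    (hR : pvRect bd N M) (hs : pvOkSkill N M s = true) :
    pvRect (pvFill bd s) N M ∧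
    ∀ a b, pvGet2 (pvFill bd s) a b = pvGet2 bd a b + pvCover s a b := by
  obtain ⟨t, r1, c1, r2, c2, deg, rfl, hr1, hr12, hr2, hc1, hc12, hc2⟩ := pvSkill_shape N M s hs
  simp only [pvFill, pvCover]
  obtain ⟨R', G'⟩ := pvRectFill_aux N M 0 (if t == 2 then deg else -deg)
    (c2 + 1 - c1).toNat (r2 + 1 - r1).toNat r1.toNat c1.toNat bd (by omega) (by omega) hR
  refine ⟨R', fun a b => ?_⟩
  rw [G' a b]
  congr 1
  simp only [show (r1.toNat ≤ a ∧ a < r1.toNat + (r2 + 1 - r1).toNat ∧ c1.toNat ≤ b ∧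
      b < c1.toNat + (c2 + 1 - c1).toNat)
    ↔ (r1 ≤ (a : Int) ∧ (a : Int) ≤ r2 ∧ c1 ≤ (b : Int) ∧ (b : Int) ≤ c2) from by omega]

theorem pvFillFold (skill : List (List Int)) (bd : List (List Int)) (N M : Nat)
    (hok : ∀ s ∈ skill, pvOkSkill N M s = true) (hR : pvRect bd N M) :
    pvRect (skill.foldl pvFill bd) N M ∧
    ∀ a b, pvGet2 (skill.foldl pvFill bd) a b
      = pvGet2 bd a b + (skill.map (fun s => pvCover s a b)).sum := by
  induction skill generalizing bd with
  | nil => exact ⟨hR, fun a b => by simp⟩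
  | cons s rest ih =>
      obtain ⟨R0, G0⟩ := pvFill_get2 bd N M s hR (hok s List.mem_cons_self)
      obtain ⟨R', G'⟩ := ih (pvFill bd s) (fun x hx => hok x (List.mem_cons_of_mem s hx)) R0
      refine ⟨R', fun a b => ?_⟩
      simp only [List.foldl_cons, List.map_cons, List.sum_cons]
      rw [G' a b, G0 a b]
      ring

theorem pvCountRange (f : Nat → Int) (k : Nat) :
    ∀ a : Int, (List.range k).foldl (fun a j => if f j > 0 then a + 1 else a) a
      = a + ∑ j ∈ Finset.range k, pvInd (f j) := by
  induction k with
  | zero => intro a; simp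
  | succ k ih =>
      intro a
      rw [List.range_succ, List.foldl_append]
      simp only [List.foldl_cons, List.foldl_nil]
      rw [ih a, Finset.sum_range_succ]
      unfold pvInd
      split_ifs <;> ring

theorem pvCountGrid (F : Nat → Nat → Int) (M k : Nat) :
    ∀ a : Int, (List.range k).foldl (fun a i =>
      (List.range M).foldl (fun a j => if F i j > 0 then a + 1 else a) a) a
      = a + ∑ i ∈ Finset.range k, ∑ j ∈ Finset.range M, pvInd (F i j) := by
  induction k with
  | zero => intro a; simp
  | succ k ih =>
      intro a
      rw [List.range_succ, List.foldl_append]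
      simp only [List.foldl_cons, List.foldl_nil]
      rw [ih a, pvCountRange (fun j => F k j) M _, Finset.sum_range_succ]
      ring

theorem pvLineSum (R d : Int) (hR : 0 ≤ R) (n : Nat) :
    ∑ x ∈ Finset.range (n + 1), (if (x : Int) = R then d else 0)
      = if R ≤ (n : Int) then d else 0 := by
  induction n with
  | zero => rw [Finset.sum_range_one]; split_ifs <;> omega
  | succ n ih =>
      rw [Finset.sum_range_succ, ih]
      split_ifs <;> omega

theorem pvCornerSum (R C d : Int) (hR : 0 ≤ R) (hC : 0 ≤ C) (n m : Nat) :
    ∑ y ∈ Finset.range (m + 1), ∑ x ∈ Finset.range (n + 1),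
        (if (x : Int) = R ∧ (y : Int) = C then d else 0)
      = if R ≤ (n : Int) ∧ C ≤ (m : Int) then d else 0 := by
  have inner : ∀ y : Nat, ∑ x ∈ Finset.range (n + 1),
      (if (x : Int) = R ∧ (y : Int) = C then d else 0)
      = if (y : Int) = C then (if R ≤ (n : Int) then d else 0) else 0 := by
    intro y
    by_cases h : (y : Int) = C
    · simp only [h, and_true, if_pos rfl]
      exact pvLineSum R d hR n
    · simp [h]
  rw [Finset.sum_congr rfl (fun y _ => inner y), pvLineSum C _ hC m]
  split_ifs <;> first | rfl | omega | tauto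
theorem pvSumSwapList (l : List (List Int)) (k : Nat) (f : Nat → List Int → Int) :
    ∑ x ∈ Finset.range k, (l.map (f x)).sum
      = (l.map (fun s => ∑ x ∈ Finset.range k, f x s)).sum := by
  induction l with
  | nil => simp
  | cons s rest ih => simp [Finset.sum_add_distrib, ih]

theorem pvPrefixCover (N M : Nat) (s : List Int) (hs : pvOkSkill N M s = true) (n m : Nat) :
    ∑ y ∈ Finset.range (m + 1), ∑ x ∈ Finset.range (n + 1), pvDiffval s x y
      = pvCover s n m := by
  obtain ⟨t, r1, c1, r2, c2, deg, rfl, hr1, hr12, hr2, hc1, hc12, hc2⟩ := pvSkill_shape N M s hs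
  simp only [pvDiffval, pvCover]
  have expand : ∀ x y : Nat, pvDiffval [t, r1, c1, r2, c2, deg] x y
      = (if (x : Int) = r1 ∧ (y : Int) = c1 then (if t == 2 then 1 else -1) * deg else 0)
        - (if (x : Int) = r1 ∧ (y : Int) = c2 + 1 then (if t == 2 then 1 else -1) * deg else 0)
        - (if (x : Int) = r2 + 1 ∧ (y : Int) = c1 then (if t == 2 then 1 else -1) * deg else 0)
        + (if (x : Int) = r2 + 1 ∧ (y : Int) = c2 + 1 then (if t == 2 then 1 else -1) * deg
            else 0) := fun x y => rfl
  simp only [expand, Finset.sum_sub_distrib, Finset.sum_add_distrib]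
  rw [pvCornerSum r1 c1 _ hr1 hc1, pvCornerSum r1 (c2 + 1) _ hr1 (by omega),
    pvCornerSum (r2 + 1) c1 _ (by omega) hc1, pvCornerSum (r2 + 1) (c2 + 1) _ (by omega) (by omega)]
  have hv : (if t == 2 then deg else -deg) = (if t == 2 then (1 : Int) else -1) * deg := by
    split <;> ring
  rw [hv]
  split_ifs <;> omega

theorem pvCoverM (N M : Nat) (s : List Int) (hs : pvOkSkill N M s = true) (n : Nat) :
    pvCover s n M = 0 := by
  obtain ⟨t, r1, c1, r2, c2, deg, rfl, hr1, hr12, hr2, hc1, hc12, hc2⟩ := pvSkill_shape N M s hs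
  simp only [pvCover]
  rw [if_neg (by omega)]

-- ===== VERDICT (by name: the statement is the Claim_ definition above) =====
theorem solution_spec : Claim_equal_solution := by
  intro board skill _ hpre
  obtain ⟨hne, hrows, hok⟩ := hpre
  unfold Spec_solution
  set N := board.length with hN
  set M := (board.headD []).length with hM
  have hRb : pvRect board N M := by
    refine ⟨rfl, fun a ha => ?_⟩
    rw [List.getD_eq_getElem?_getD, List.getElem?_eq_getElem ha]
    exact hrows _ (List.getElem_mem ha)
  
  -- A side
  have hmemo : ∀ n m, pvGet2 (skill.foldl pvSkillDiff (pvZeros (N + 1) (M + 1))) n m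
      = (skill.map (fun s => pvDiffval s n m)).sum := by
    intro n m
    rw [pvMemoFold_get2 skill _ N M n m hok (pvRect_zeros _ _), pvGet2_zeros]
    ring
  obtain ⟨hRt, htot⟩ := pvColPass_aux (skill.foldl pvSkillDiff (pvZeros (N + 1) (M + 1))) N M
    (M + 1) le_rfl
  have htotP : ∀ a b,
      pvGet2 (pvColPass (skill.foldl pvSkillDiff (pvZeros (N + 1) (M + 1))) N M) a b
      = if b < M + 1 ∧ a < N + 1 then
          ∑ x ∈ Finset.range (a + 1),
            pvGet2 (skill.foldl pvSkillDiff (pvZeros (N + 1) (M + 1))) x b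
        else 0 := htot
  obtain ⟨-, -, hans, -⟩ := pvFinOuter_aux (pvColPass (skill.foldl pvSkillDiff
    (pvZeros (N + 1) (M + 1))) N M) board N M N le_rfl hRb
  have hDsum : ∀ n' m'', n' ≤ N → m'' ≤ M →
      ∑ y ∈ Finset.range (m'' + 1),
        pvGet2 (pvColPass (skill.foldl pvSkillDiff (pvZeros (N + 1) (M + 1))) N M) n' y
      = (skill.map (fun s => pvCover s n' m'')).sum := by
    intro n' m'' hn' hm''
    have e1 : ∀ y, y ∈ Finset.range (m'' + 1) →
        pvGet2 (pvColPass (skill.foldl pvSkillDiff (pvZeros (N + 1) (M + 1))) N M) n' y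
        = (skill.map (fun s => ∑ x ∈ Finset.range (n' + 1), pvDiffval s x y)).sum := by
      intro y hy
      simp only [Finset.mem_range] at hy
      rw [htotP n' y, if_pos ⟨by omega, by omega⟩]
      rw [Finset.sum_congr rfl (fun x _ => hmemo x y)]
      exact pvSumSwapList skill (n' + 1) (fun x s => pvDiffval s x y)
    rw [Finset.sum_congr rfl e1, pvSumSwapList skill (m'' + 1)
      (fun y s => ∑ x ∈ Finset.range (n' + 1), pvDiffval s x y)]
    congr 1
    refine List.map_congr_left (fun s hs => ?_)
    exact pvPrefixCover N M s (hok s hs) n' m''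
  have hH0 : ∀ n', n' < N →
      ∑ y ∈ Finset.range (M + 1),
        pvGet2 (pvColPass (skill.foldl pvSkillDiff (pvZeros (N + 1) (M + 1))) N M) n' y = 0 := by
    intro n' hn'
    rw [hDsum n' M (by omega) le_rfl]
    have e : skill.map (fun s => pvCover s n' M) = skill.map (fun _ => (0 : Int)) :=
      List.map_congr_left (fun s hs => pvCoverM N M s (hok s hs) n')
    simp [e]
  -- B side
  obtain ⟨-, hg⟩ := pvFillFold skill board N M hok hRb
  show solution board skill = solution_alt board skill
  simp only [solution, solution_alt]
  rw [← hN, ← hM, hans,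
    pvCountGrid (fun i j => pvGet2 (skill.foldl pvFill board) i j) M N 0, zero_add]
  refine Finset.sum_congr rfl (fun n hn => ?_)
  simp only [Finset.mem_range] at hn
  refine Finset.sum_congr rfl (fun m hm => ?_)
  simp only [Finset.mem_range] at hm
  rw [hg n m]
  congr 1
  rw [Finset.sum_congr rfl
      (fun n' hn' => hH0 n' (by simp only [Finset.mem_range] at hn'; omega)),
    hDsum n m (by omega) (by omega), Finset.sum_const_zero, zero_add]
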